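-- pv_equiv track=rewrite | github.com/pxue/empireofcode | three_words.py | three_words
-- ===== SOURCE A (Python) =====
-- def three_words(words):
--     w = words.split()
--     c = 0
--     max_c = 0
--     for x in w:
--         if x.isdigit():
--             c = 0
--         else:
--             c += 1
--         max_c = max(c, max_c)
--     return max_c >= 3
-- ===== SOURCE B (Python) =====
-- def three_words(words):
--     # run-length encode the word stream by isdigit, then look for a non-digit run of length >= 3
--     groups = []
--     for x in words.split():
--         k = x.isdigit()
--         if groups and groups[-1][0] == k:
--             groups[-1][1] += 1
--         else:
--             groups.append([k, 1])
--     return any(not k and n >= 3 for k, n in groups)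
-- ===== Notes on version B (the rewrite author's own statement) =====
-- stated objective: alternative
-- what changed: B run-length-encodes the word stream into (isdigit, run-length) groups and checks whether any non-digit run reaches 3, instead of threading a counter and a running max through every word.
import Mathlib
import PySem

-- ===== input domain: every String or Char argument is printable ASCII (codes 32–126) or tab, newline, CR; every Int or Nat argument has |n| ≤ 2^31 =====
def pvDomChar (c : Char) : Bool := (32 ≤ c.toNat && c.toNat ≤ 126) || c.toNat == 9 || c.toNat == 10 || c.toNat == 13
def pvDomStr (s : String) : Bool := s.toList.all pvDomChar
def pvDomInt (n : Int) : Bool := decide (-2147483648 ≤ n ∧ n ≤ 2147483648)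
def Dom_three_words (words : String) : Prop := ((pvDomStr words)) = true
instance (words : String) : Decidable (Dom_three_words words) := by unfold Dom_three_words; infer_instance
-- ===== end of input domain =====

-- B replaces A's counter/running-max scan by run-length grouping of the words by isdigit (alternative decomposition, same cost).


-- ===== PORT A =====
def three_words (words : String) : Bool :=
  let w := PySem.Str.split₀ words
  let res := w.foldl (fun (p : Int × Int) x =>
      let c : Int := if PySem.Str.strIsdigit x then 0 else p.1 + 1
      (c, max c p.2)) ((0 : Int), (0 : Int))
  decide (res.2 ≥ 3)

-- ===== PORT B =====
-- Source B mutates the last group in place; the port prepends (groups kept in reverse),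
-- which transcribes the same run-length construction; `any` is order-insensitive.
def three_words_alt (words : String) : Bool :=
  let groups := (PySem.Str.split₀ words).foldl (fun gs x =>
      let k := PySem.Str.strIsdigit x
      match gs with
      | [] => [(k, (1 : Int))]
      | (k', n) :: rest => if k' == k then (k, n + 1) :: rest else (k, 1) :: (k', n) :: rest) []
  groups.any (fun p => !p.1 && decide (p.2 ≥ 3))

-- ===== PRECONDITION & SPEC =====
def Spec_three_words (words : String) (out : Bool) : Prop := out = three_words_alt words
instance (words : String) (out : Bool) : Decidable (Spec_three_words words out) := by unfold Spec_three_words; infer_instance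

-- ===== CLAIM (what is proved, stated in full; the proofs are below) =====
def Claim_equal_three_words : Prop := ∀ (words : String), Dom_three_words words → Spec_three_words words (three_words words)

-- ===== LEMMAS AND PROOFS =====

-- Invariant: A's current counter equals the length of B's current head run if it is a
-- non-digit run (else 0), and "max so far ≥ 3" iff some built group is a non-digit run of length ≥ 3.
theorem pv_key : ∀ (l : List String) (gs : List (Bool × Int)) (c m : Int),
    c = (match gs with | (false, n) :: _ => n | _ => 0) →
    (decide (3 ≤ m) = gs.any (fun p => !p.1 && decide (p.2 ≥ 3))) →
    decide (3 ≤ (l.foldl (fun (p : Int × Int) x =>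
        let c : Int := if PySem.Str.strIsdigit x then 0 else p.1 + 1
        (c, max c p.2)) (c, m)).2)
      = (l.foldl (fun gs x =>
          let k := PySem.Str.strIsdigit x
          match gs with
          | [] => [(k, (1 : Int))]
          | (k', n) :: rest => if k' == k then (k, n + 1) :: rest else (k, 1) :: (k', n) :: rest) gs).any
          (fun p => !p.1 && decide (p.2 ≥ 3)) := by
  intro l
  induction l with
  | nil => intro gs c m hc hm; simpa using hm
  | cons x l ih =>
    intro gs c m hc hm
    simp only [List.foldl_cons]
    by_cases hd : PySem.Str.strIsdigit x
    · -- digit word: counter resets; B starts/extends a true-run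
      simp only [hd, if_true]
      match gs, hc, hm with
      | [], hc, hm =>
        refine ih [(true, 1)] 0 (max 0 m) rfl ?_
        simp only [List.any_nil, decide_eq_false_iff_not] at hm
        simp only [List.any_cons, List.any_nil, Bool.not_true, Bool.false_and, Bool.or_false,
          decide_eq_false_iff_not]
        omega
      | (true, n) :: rest, hc, hm =>
        refine ih ((true, n + 1) :: rest) 0 (max 0 m) rfl ?_
        simp only [List.any_cons, Bool.not_true, Bool.false_and, Bool.false_or] at hm ⊢
        rw [← hm, decide_eq_decide]
        omega
      | (false, n) :: rest, hc, hm =>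
        refine ih ((true, 1) :: (false, n) :: rest) 0 (max 0 m) rfl ?_
        simp only [List.any_cons, Bool.not_true, Bool.not_false, Bool.false_and, Bool.true_and,
          Bool.false_or] at hm ⊢
        rw [← hm, decide_eq_decide]
        omega
    · -- non-digit word: counter increments; B starts/extends a false-run
      simp only [hd, if_false, Bool.false_eq_true]
      match gs, hc, hm with
      | [], hc, hm =>
        have hc0 : c = 0 := hc
        subst hc0
        refine ih [(false, 0 + 1)] (0 + 1) (max (0 + 1) m) rfl ?_
        simp only [List.any_nil, decide_eq_false_iff_not] at hm
        simp only [List.any_cons, List.any_nil, Bool.not_false, Bool.true_and, Bool.or_false,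
          decide_eq_decide]
        omega
      | (true, n) :: rest, hc, hm =>
        have hc0 : c = 0 := hc
        subst hc0
        refine ih ((false, 0 + 1) :: (true, n) :: rest) (0 + 1) (max (0 + 1) m) rfl ?_
        simp only [List.any_cons, Bool.not_true, Bool.not_false, Bool.false_and, Bool.true_and,
          Bool.false_or] at hm ⊢
        rw [← hm]
        by_cases h : (3 : Int) ≤ m <;> simp [h]
      | (false, n) :: rest, hc, hm =>
        have hc0 : c = n := hc
        subst hc0
        refine ih ((false, c + 1) :: rest) (c + 1) (max (c + 1) m) rfl ?_
        simp only [List.any_cons, Bool.not_false, Bool.true_and] at hm ⊢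
        cases hrest : rest.any (fun p => !p.1 && decide (p.2 ≥ 3)) <;> rw [hrest] at hm <;>
          simp only [Bool.or_true, Bool.or_false, decide_eq_true_eq] at hm ⊢ <;>
          [(simp only [decide_eq_decide] at hm ⊢); skip] <;> omega

-- ===== VERDICT (by name: the statement is the Claim_ definition above) =====
theorem three_words_spec : Claim_equal_three_words := by
  intro words _
  unfold Spec_three_words three_words three_words_alt
  exact pv_key (PySem.Str.split₀ words) [] 0 0 rfl (by decide)
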